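-- pv_equiv track=rewrite | github.com/MrBrantCode/unitest_baseline | mut_generate/mist_train_cf/cf_93093/solution.py | find_largest_common_factor
-- ===== SOURCE A (Python) =====
-- def find_largest_common_factor(N1, N2, R):
--     # Find the smaller number between N1 and N2
--     if N1 < N2:
--         smaller = N1
--     else:
--         smaller = N2
--
--     largest_common_factor = -1
--     # Iterate from R to 1
--     for i in range(R, 0, -1):
--         # Check if i is a factor of both N1 and N2
--         if N1 % i == 0 and N2 % i == 0:
--             # Update the largest common factor
--             largest_common_factor = i
--             break
--
--     return largest_common_factor
-- ===== SOURCE B (Python) =====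
-- def find_largest_common_factor(N1, N2, R):
--     # Euclid's gcd, then enumerate divisors of the gcd in O(sqrt(g))
--     a, b = abs(N1), abs(N2)
--     while b != 0:
--         a, b = b, a % b
--     g = a
--     if g == 0:
--         # every positive integer divides 0
--         return R if R >= 1 else -1
--     best = -1
--     d = 1
--     while d * d <= g:
--         if g % d == 0:
--             if d <= R and d > best:
--                 best = d
--             e = g // d
--             if e <= R and e > best:
--                 best = e
--         d += 1
--     return best
-- ===== Notes on version B (the rewrite author's own statement) =====
-- stated objective: faster
-- what changed: A scans i = R, R-1, ... down to 1 testing divisibility of both numbers until the first hit; B computes g = gcd(N1, N2) with Euclid's algorithm and enumerates the divisor pairs (d, g//d) of g for d up to sqrt(g), keeping the largest one that is <= R.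
import Mathlib
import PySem

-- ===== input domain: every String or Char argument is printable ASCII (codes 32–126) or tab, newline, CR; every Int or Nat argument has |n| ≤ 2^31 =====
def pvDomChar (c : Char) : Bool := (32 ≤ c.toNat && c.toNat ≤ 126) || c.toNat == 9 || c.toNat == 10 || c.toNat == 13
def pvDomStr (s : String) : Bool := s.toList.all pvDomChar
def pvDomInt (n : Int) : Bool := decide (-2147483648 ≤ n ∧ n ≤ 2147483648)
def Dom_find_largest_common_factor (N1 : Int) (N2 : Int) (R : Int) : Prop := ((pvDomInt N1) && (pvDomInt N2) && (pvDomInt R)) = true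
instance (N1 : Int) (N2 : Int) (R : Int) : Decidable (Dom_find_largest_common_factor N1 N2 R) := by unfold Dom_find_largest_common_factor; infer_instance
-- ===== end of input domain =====

-- B replaces A's downward O(R) trial scan by Euclid's gcd followed by an
-- O(sqrt(gcd)) enumeration of the gcd's divisor pairs (objective: faster).

-- ===== PORT A =====
-- the for-loop of A: scan i = R, R-1, …, 1 and break at the first common factor
def pvScanA (N1 : Int) (N2 : Int) : List Int → Int → Int
  | [], lcf => lcf
  | i :: rest, lcf =>
      if PySem.Int.mod N1 i = 0 ∧ PySem.Int.mod N2 i = 0 then i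
      else pvScanA N1 N2 rest lcf

def find_largest_common_factor (N1 : Int) (N2 : Int) (R : Int) : Int :=
  let _smaller : Int := if N1 < N2 then N1 else N2
  pvScanA N1 N2 (PySem.List.pyRange R 0 (-1)) (-1)

-- ===== PORT B =====
-- Source B's Euclid loop: while b != 0: a, b = b, a % b
def pvGcdB (a : Int) (b : Int) : Int :=
  if b = 0 then a else pvGcdB b (PySem.Int.mod a b)
termination_by b.natAbs
decreasing_by
  rename_i h
  rcases lt_trichotomy b 0 with hb | hb | hb
  · have h1 := (PySem.Int.mod_neg_bounds (a := a) hb).1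
    have h2 := (PySem.Int.mod_neg_bounds (a := a) hb).2
    omega
  · exact absurd hb h
  · have h1 := PySem.Int.mod_nonneg (a := a) hb
    have h2 := PySem.Int.mod_lt (a := a) hb
    omega

-- Source B's divisor loop: while d*d <= g, consider d and g//d as candidates
def pvLoopB (g : Int) (R : Int) (d : Int) (best : Int) : Int :=
  if h : d * d ≤ g then
    let best' : Int :=
      if PySem.Int.mod g d = 0 then
        let b1 : Int := if d ≤ R ∧ best < d then d else best
        let e : Int := PySem.Int.floordiv g d
        if e ≤ R ∧ b1 < e then e else b1
      else best
    pvLoopB g R (d + 1) best'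
  else best
termination_by (g + 1 - d).toNat
decreasing_by
  have hd : d ≤ g := by nlinarith [sq_nonneg d, sq_nonneg (d - 1)]
  omega

def find_largest_common_factor_alt (N1 : Int) (N2 : Int) (R : Int) : Int :=
  let g : Int := pvGcdB |N1| |N2|
  if g = 0 then (if 1 ≤ R then R else -1)
  else pvLoopB g R 1 (-1)

-- ===== PRECONDITION & SPEC =====
def Spec_find_largest_common_factor (N1 : Int) (N2 : Int) (R : Int) (out : Int) : Prop := out = find_largest_common_factor_alt N1 N2 R
instance (N1 : Int) (N2 : Int) (R : Int) (out : Int) : Decidable (Spec_find_largest_common_factor N1 N2 R out) := by unfold Spec_find_largest_common_factor; infer_instance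

-- ===== CLAIM (what is proved, stated in full; the proofs are below) =====
def Claim_equal_find_largest_common_factor : Prop := ∀ (N1 : Int) (N2 : Int) (R : Int), Dom_find_largest_common_factor N1 N2 R → Spec_find_largest_common_factor N1 N2 R (find_largest_common_factor N1 N2 R)

-- ===== LEMMAS AND PROOFS =====

-- "res is the largest i with 1 ≤ i ≤ R and i ∣ g, or -1 if there is none"
def pvIsRes (g : Int) (R : Int) (res : Int) : Prop :=
  (res = -1 ∧ ∀ i : Int, 1 ≤ i → i ≤ R → ¬ i ∣ g) ∨
  (1 ≤ res ∧ res ≤ R ∧ res ∣ g ∧ ∀ i : Int, res < i → i ≤ R → ¬ i ∣ g)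

theorem pvIsRes_unique {g R x y : Int} (hx : pvIsRes g R x) (hy : pvIsRes g R y) : x = y := by
  rcases hx with ⟨hx1, hx2⟩ | ⟨hx1, hx2, hx3, hx4⟩ <;>
    rcases hy with ⟨hy1, hy2⟩ | ⟨hy1, hy2, hy3, hy4⟩
  · omega
  · exact absurd hy3 (hx2 y hy1 hy2)
  · exact absurd hx3 (hy2 x hx1 hx2)
  · by_contra hne
    rcases lt_or_gt_of_ne hne with h | h
    · exact hx4 y h hy2 hy3
    · exact hy4 x h hx2 hx3

-- divisibility characterisation of the Euclid port (for nonnegative arguments)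
theorem pvGcdB_dvd_iff : ∀ (n : Nat) (a b : Int), b.natAbs ≤ n → 0 ≤ a → 0 ≤ b →
    (0 ≤ pvGcdB a b ∧ ∀ i : Int, (i ∣ pvGcdB a b ↔ i ∣ a ∧ i ∣ b)) := by
  intro n
  induction n with
  | zero =>
    intro a b hn ha hb
    have hb0 : b = 0 := by omega
    subst hb0
    rw [pvGcdB]
    simp [ha]
  | succ n ih =>
    intro a b hn ha hb
    by_cases hb0 : b = 0
    · subst hb0
      rw [pvGcdB]
      simp [ha]
    · have hbpos : 0 < b := lt_of_le_of_ne hb (Ne.symm hb0)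
      have hr1 := PySem.Int.mod_nonneg (a := a) hbpos
      have hr2 := PySem.Int.mod_lt (a := a) hbpos
      rw [pvGcdB]
      simp only [hb0, if_false]
      have hrec := ih b (PySem.Int.mod a b) (by omega) hb hr1
      refine ⟨hrec.1, fun i => ?_⟩
      rw [hrec.2 i]
      have hmod : PySem.Int.mod a b = a % b := PySem.Int.mod_eq_emod_of_pos hbpos
      rw [hmod, Int.emod_def]
      constructor
      · rintro ⟨h1, h2⟩
        refine ⟨?_, h1⟩
        have := dvd_add h2 (Dvd.dvd.mul_right h1 (a / b))
        simpa using this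
      · rintro ⟨h1, h2⟩
        exact ⟨h2, dvd_sub h1 (Dvd.dvd.mul_right h2 (a / b))⟩

-- A's scan computes the largest common factor ≤ R, given the divisibility bridge
theorem pvScanA_isRes (N1 N2 g : Int)
    (hbr : ∀ i : Int, 1 ≤ i → ((PySem.Int.mod N1 i = 0 ∧ PySem.Int.mod N2 i = 0) ↔ i ∣ g)) :
    ∀ (n : Nat) (R : Int), R ≤ n →
      pvIsRes g R (pvScanA N1 N2 (PySem.List.pyRange R 0 (-1)) (-1)) := by
  intro n
  induction n with
  | zero =>
    intro R hR
    rw [PySem.List.pyRange_neg_one_eq_nil (by exact_mod_cast hR)]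
    exact Or.inl ⟨rfl, fun i h1 h2 => by omega⟩
  | succ n ih =>
    intro R hR
    by_cases hRpos : 0 < R
    · rw [PySem.List.pyRange_neg_one_cons hRpos, pvScanA]
      by_cases hc : PySem.Int.mod N1 R = 0 ∧ PySem.Int.mod N2 R = 0
      · rw [if_pos hc]
        refine Or.inr ⟨hRpos, le_refl R, (hbr R hRpos).mp hc, fun i h1 h2 => ?_⟩
        intro _; omega
      · rw [if_neg hc]
        have hnd : ¬ R ∣ g := fun hd => hc ((hbr R hRpos).mpr hd)
        have hrec := ih (R - 1) (by omega)
        rcases hrec with ⟨h1, h2⟩ | ⟨h1, h2, h3, h4⟩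
        · refine Or.inl ⟨h1, fun i hi1 hi2 => ?_⟩
          rcases eq_or_lt_of_le hi2 with heq | hlt
          · subst heq; exact hnd
          · exact h2 i hi1 (by omega)
        · refine Or.inr ⟨h1, by omega, h3, fun i hi1 hi2 => ?_⟩
          rcases eq_or_lt_of_le hi2 with heq | hlt
          · subst heq; exact hnd
          · exact h4 i hi1 (by omega)
    · rw [PySem.List.pyRange_neg_one_eq_nil (by omega)]
      exact Or.inl ⟨rfl, fun i h1 h2 => by omega⟩

-- cofactor facts for a positive divisor of a positive g
theorem pvCof_mul {g e : Int} (hd : e ∣ g) : g / e * e = g :=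
  Int.ediv_mul_cancel hd

theorem pvCof_pos {g e : Int} (hg : 1 ≤ g) (he : 1 ≤ e) (hd : e ∣ g) : 1 ≤ g / e := by
  have hm := pvCof_mul hd
  nlinarith

-- once d*d > g, every eligible divisor has been considered: the loop stops correctly
theorem pvLoopB_stop (g R d best : Int) (hd : 1 ≤ d) (hstop : ¬ d * d ≤ g)
    (hb1 : best = -1 ∨ (1 ≤ best ∧ best ≤ R ∧ best ∣ g))
    (hb2 : ∀ e : Int, e ∣ g → 1 ≤ e → e ≤ R → (e < d ∨ g / e < d) → e ≤ best) :
    pvIsRes g R best := by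
  have hall : ∀ e : Int, e ∣ g → 1 ≤ e → e ≤ R → e ≤ best := by
    intro e hdvd he1 he2
    refine hb2 e hdvd he1 he2 ?_
    by_cases hlt : e < d
    · exact Or.inl hlt
    · right
      have hcm := pvCof_mul hdvd
      by_contra hge
      rw [not_lt] at hge
      have hde : d ≤ e := not_lt.mp hlt
      have hmm := mul_le_mul hge hde (by omega) (le_trans (by omega) hge)
      rw [hcm] at hmm
      exact hstop hmm
  rcases hb1 with h | ⟨h1, h2, h3⟩
  · subst h
    exact Or.inl ⟨rfl, fun i hi1 hi2 hdvd => by have := hall i hdvd hi1 hi2; omega⟩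
  · refine Or.inr ⟨h1, h2, h3, fun i hi1 hi2 hdvd => ?_⟩
    have := hall i hdvd (by omega) hi2
    omega

-- B's divisor-pair loop invariant
theorem pvLoopB_isRes (g R : Int) (hg : 1 ≤ g) :
    ∀ (n : Nat) (d best : Int), (g + 1 - d).toNat ≤ n → 1 ≤ d →
      (best = -1 ∨ (1 ≤ best ∧ best ≤ R ∧ best ∣ g)) →
      (∀ e : Int, e ∣ g → 1 ≤ e → e ≤ R → (e < d ∨ g / e < d) → e ≤ best) →
      pvIsRes g R (pvLoopB g R d best) := by
  intro n
  induction n with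
  | zero =>
    intro d best hn hd hb1 hb2
    have hdg : g + 1 ≤ d := by omega
    have hstop : ¬ d * d ≤ g := by nlinarith
    rw [pvLoopB, dif_neg hstop]
    exact pvLoopB_stop g R d best hd hstop hb1 hb2
  | succ n ih =>
    intro d best hn hd hb1 hb2
    by_cases hcont : d * d ≤ g
    · rw [pvLoopB, dif_pos hcont]
      have hdle : d ≤ g := by nlinarith
      by_cases hmd : PySem.Int.mod g d = 0
      · -- d divides g: consider d and its cofactor e0 = g // d
        have hdvd : d ∣ g := (PySem.Int.mod_eq_zero_iff_dvd g d).mp hmd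
        have hfd : PySem.Int.floordiv g d = g / d := PySem.Int.floordiv_eq_ediv_of_pos (by omega)
        simp only [hmd, if_true, hfd]
        set e0 : Int := g / d with he0def
        have he0pos : 1 ≤ e0 := pvCof_pos hg hd hdvd
        have he0mul : e0 * d = g := pvCof_mul hdvd
        have he0dvd : e0 ∣ g := ⟨d, he0mul.symm⟩
        set b1 : Int := if d ≤ R ∧ best < d then d else best with hb1def
        set best' : Int := if e0 ≤ R ∧ b1 < e0 then e0 else b1 with hbestdef
        have hmono1 : best ≤ b1 := by rw [hb1def]; split_ifs with h <;> omega
        have hmono2 : b1 ≤ best' := by rw [hbestdef]; split_ifs with h <;> omega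
        refine ih (d + 1) best' (by omega) (by omega) ?_ ?_
        · -- Inv1 for best'
          rw [hbestdef]
          split_ifs with h
          · exact Or.inr ⟨he0pos, h.1, he0dvd⟩
          · rw [hb1def]
            split_ifs with h'
            · exact Or.inr ⟨by omega, h'.1, hdvd⟩
            · exact hb1
        · -- Inv2 for best' at d+1
          intro e hedvd he1 he2 hcons
          have hcof : g / e * e = g := pvCof_mul hedvd
          rcases hcons with hlt | hlt
          · rcases lt_or_eq_of_le (by omega : e ≤ d) with h | h
            · have := hb2 e hedvd he1 he2 (Or.inl h)
              omega
            · -- e = d: the first update covers it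
              subst h
              have hb1ge : e ≤ b1 := by rw [hb1def]; split_ifs with h' <;> omega
              omega
          · rcases lt_or_eq_of_le (by omega : g / e ≤ d) with h | h
            · have := hb2 e hedvd he1 he2 (Or.inr h)
              omega
            · -- g / e = d: then e = e0, the second update covers it
              have hee0 : e = e0 := by
                have : d * e = g := by rw [← h]; exact hcof
                have hd0 : d ≠ 0 := by omega
                have := mul_left_cancel₀ hd0 (a := d) (b := e) (c := e0)
                  (by rw [this]; nlinarith)
                omega
              subst hee0
              rw [hbestdef]
              split_ifs with h' <;> omega
      · -- d does not divide g: best unchanged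
        simp only [hmd, if_false]
        refine ih (d + 1) best (by omega) (by omega) hb1 ?_
        intro e hedvd he1 he2 hcons
        have hnd : ¬ d ∣ g := fun hdd => hmd ((PySem.Int.mod_eq_zero_iff_dvd g d).mpr hdd)
        have hcof : g / e * e = g := pvCof_mul hedvd
        rcases hcons with hlt | hlt
        · rcases lt_or_eq_of_le (by omega : e ≤ d) with h | h
          · exact hb2 e hedvd he1 he2 (Or.inl h)
          · subst h; exact absurd hedvd hnd
        · rcases lt_or_eq_of_le (by omega : g / e ≤ d) with h | h
          · exact hb2 e hedvd he1 he2 (Or.inr h)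
          · exact absurd (show d ∣ g from ⟨e, by rw [← h]; omega⟩) hnd
    · rw [pvLoopB, dif_neg hcont]
      exact pvLoopB_stop g R d best hd hcont hb1 hb2

-- A's result satisfies pvIsRes for g = the Euclid gcd of |N1|, |N2|
theorem pvA_isRes (N1 N2 R : Int) :
    pvIsRes (pvGcdB |N1| |N2|) R (find_largest_common_factor N1 N2 R) := by
  have hchar := pvGcdB_dvd_iff (|N2|).natAbs |N1| |N2| le_rfl (abs_nonneg N1) (abs_nonneg N2)
  have hbr : ∀ i : Int, 1 ≤ i →
      ((PySem.Int.mod N1 i = 0 ∧ PySem.Int.mod N2 i = 0) ↔ i ∣ pvGcdB |N1| |N2|) := by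
    intro i _
    rw [hchar.2 i, PySem.Int.mod_eq_zero_iff_dvd, PySem.Int.mod_eq_zero_iff_dvd,
      dvd_abs, dvd_abs]
  show pvIsRes (pvGcdB |N1| |N2|) R (pvScanA N1 N2 (PySem.List.pyRange R 0 (-1)) (-1))
  exact pvScanA_isRes N1 N2 (pvGcdB |N1| |N2|) hbr R.toNat R (Int.self_le_toNat R)

-- B's result satisfies pvIsRes for the same g
theorem pvB_isRes (N1 N2 R : Int) :
    pvIsRes (pvGcdB |N1| |N2|) R (find_largest_common_factor_alt N1 N2 R) := by
  have hchar := pvGcdB_dvd_iff (|N2|).natAbs |N1| |N2| le_rfl (abs_nonneg N1) (abs_nonneg N2)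
  show pvIsRes (pvGcdB |N1| |N2|) R
    (if pvGcdB |N1| |N2| = 0 then (if 1 ≤ R then R else -1) else pvLoopB (pvGcdB |N1| |N2|) R 1 (-1))
  by_cases hg : pvGcdB |N1| |N2| = 0
  · rw [if_pos hg, hg]
    by_cases hR : 1 ≤ R
    · rw [if_pos hR]
      exact Or.inr ⟨hR, le_refl R, dvd_zero R, fun i h1 h2 _ => by omega⟩
    · rw [if_neg hR]
      exact Or.inl ⟨rfl, fun i h1 h2 => by omega⟩
  · rw [if_neg hg]
    have hg1 : 1 ≤ pvGcdB |N1| |N2| := by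
      have := hchar.1
      omega
    refine pvLoopB_isRes (pvGcdB |N1| |N2|) R hg1 (pvGcdB |N1| |N2|).toNat 1 (-1)
      (by omega) le_rfl (Or.inl rfl) ?_
    intro e hedvd he1 he2 hcons
    rcases hcons with h | h
    · omega
    · have := pvCof_pos hg1 he1 hedvd
      omega

-- ===== VERDICT (by name: the statement is the Claim_ definition above) =====
theorem find_largest_common_factor_spec : Claim_equal_find_largest_common_factor := by
  intro N1 N2 R _
  show find_largest_common_factor N1 N2 R = find_largest_common_factor_alt N1 N2 R
  exact pvIsRes_unique (pvA_isRes N1 N2 R) (pvB_isRes N1 N2 R)
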